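-- pv_equiv track=rewrite | github.com/davidkern13/multiagent-rag-system | retrieval/metadata_extractor.py | extract_section_title
-- ===== SOURCE A (Python) =====
-- def extract_section_title(text: str) -> str:
--     """
--     Extract section title from text.
--     """
--     lines = text.strip().splitlines()
--     for line in lines:
--         # Look for lines that might be titles (short, capitalized)
--         line = line.strip()
--         if line and len(line) < 100:
--             # Check if it looks like a title
--             if line.isupper() or (line[0].isupper() and line.count(".") < 2):
--                 return line
--
--     # Fallback: return first non-empty line
--     for line in lines:
--         if line.strip():
--             return line.strip()[:100]
--
--     return "Untitled Section"
-- ===== SOURCE B (Python) =====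
-- def _looks_like_title(s: str) -> bool:
--     return len(s) < 100 and (s.isupper() or (s[0].isupper() and s.count(".") < 2))
--
--
-- def extract_section_title(text: str) -> str:
--     fallback = None
--     for line in text.strip().splitlines():
--         stripped = line.strip()
--         if not stripped:
--             continue
--         if fallback is None:
--             fallback = stripped[:100]
--         if _looks_like_title(stripped):
--             return stripped
--     return fallback if fallback is not None else "Untitled Section"
-- ===== Notes on version B (the rewrite author's own statement) =====
-- stated objective: simpler
-- what changed: Replaces A's two sequential scans (title search, then a second fallback scan over all lines) with a single pass that records the first non-empty stripped line as fallback while searching for a title.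
import Mathlib
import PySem

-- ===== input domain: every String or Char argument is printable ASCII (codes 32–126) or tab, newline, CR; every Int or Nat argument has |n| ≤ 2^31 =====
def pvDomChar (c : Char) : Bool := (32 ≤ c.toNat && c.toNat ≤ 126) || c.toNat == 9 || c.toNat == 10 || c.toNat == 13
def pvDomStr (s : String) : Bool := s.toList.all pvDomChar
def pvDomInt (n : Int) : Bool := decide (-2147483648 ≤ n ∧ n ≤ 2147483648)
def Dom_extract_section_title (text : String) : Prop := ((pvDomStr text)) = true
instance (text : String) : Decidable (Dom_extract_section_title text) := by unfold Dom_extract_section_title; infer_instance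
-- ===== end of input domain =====

-- B replaces A's two sequential scans with a single pass that records the first
-- non-empty stripped line as fallback while searching for a title (simpler decomposition).


-- ===== PORT A =====
-- str.isupper(): at least one cased char and no lowercase one; exact on the ASCII domain,
-- where the cased characters are exactly the alphabetic ones. Used by both ports as a builtin.
def pyStrIsupper (s : String) : Bool :=
  s.toList.any PySem.Chars.isalpha && s.toList.all (fun c => !(PySem.Chars.islower c))

-- line[0].isupper(); the none branch is unreachable in both ports (callers guard s ≠ "")
def pyHeadIsupper (s : String) : Bool :=
  match PySem.Str.pyGet? s 0 with
  | some c => PySem.Chars.isupper c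
  | none => false

-- second loop of A: first non-empty stripped line, truncated to 100 chars
def extractGoA2 : List String → String
  | [] => "Untitled Section"
  | l :: t =>
    if PySem.Str.strip l ≠ "" then PySem.Str.slice (PySem.Str.strip l) none (some 100)
    else extractGoA2 t

-- first loop of A over the remaining lines, keeping the full list for the fallback loop
def extractGoA1 (lines : List String) : List String → String
  | [] => extractGoA2 lines
  | l :: t =>
    let line := PySem.Str.strip l
    if line ≠ "" ∧ PySem.Str.len line < 100 then
      if pyStrIsupper line || (pyHeadIsupper line && decide (PySem.Str.count line "." < 2)) then line
      else extractGoA1 lines t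
    else extractGoA1 lines t

def extract_section_title (text : String) : String :=
  let lines := PySem.Str.splitlines (PySem.Str.strip text)
  extractGoA1 lines lines

-- ===== PORT B =====
def looksLikeTitle (s : String) : Bool :=
  PySem.Str.len s < 100 &&
    (pyStrIsupper s || (pyHeadIsupper s && decide (PySem.Str.count s "." < 2)))

-- single pass of B, carrying the fallback (first non-empty stripped line, truncated)
def extractGoB : List String → Option String → String
  | [], fb => fb.getD "Untitled Section"
  | l :: t, fb =>
    let stripped := PySem.Str.strip l
    if stripped = "" then extractGoB t fb
    else
      let fb' := if fb = none then some (PySem.Str.slice stripped none (some 100)) else fb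
      if looksLikeTitle stripped then stripped else extractGoB t fb'

def extract_section_title_alt (text : String) : String :=
  extractGoB (PySem.Str.splitlines (PySem.Str.strip text)) none

-- ===== PRECONDITION & SPEC =====
def Spec_extract_section_title (text : String) (out : String) : Prop := out = extract_section_title_alt text
instance (text : String) (out : String) : Decidable (Spec_extract_section_title text out) := by unfold Spec_extract_section_title; infer_instance

-- ===== CLAIM (what is proved, stated in full; the proofs are below) =====
def Claim_equal_extract_section_title : Prop := ∀ (text : String), Dom_extract_section_title text → Spec_extract_section_title text (extract_section_title text)

-- ===== LEMMAS AND PROOFS =====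
-- the title test as applied by A to a stripped line
def titleCond (s : String) : Bool := s ≠ "" && looksLikeTitle s

theorem goA2_eq (ls : List String) :
    extractGoA2 ls =
      match (ls.map PySem.Str.strip).find? (fun s => s ≠ "") with
      | some s => PySem.Str.slice s none (some 100)
      | none => "Untitled Section" := by
  induction ls with
  | nil => rfl
  | cons l t ih =>
    by_cases h : PySem.Str.strip l = ""
    · simp [extractGoA2, h, ih]
    · simp [extractGoA2, h]

theorem titleCond_true_iff (s : String) :
    titleCond s = true ↔ s ≠ "" ∧ PySem.Str.len s < 100 ∧
      (pyStrIsupper s || (pyHeadIsupper s && decide (PySem.Str.count s "." < 2))) = true := by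
  simp [titleCond, looksLikeTitle]

theorem goA1_eq (lines : List String) (ls : List String) :
    extractGoA1 lines ls =
      match (ls.map PySem.Str.strip).find? titleCond with
      | some s => s
      | none => extractGoA2 lines := by
  induction ls with
  | nil => rfl
  | cons l t ih =>
    simp only [List.map_cons, List.find?_cons]
    cases hcond : titleCond (PySem.Str.strip l) with
    | true =>
      obtain ⟨h1, h2, h3⟩ := (titleCond_true_iff _).mp hcond
      simp only [extractGoA1]
      rw [if_pos ⟨h1, h2⟩, if_pos h3]
    | false =>
      simp only [extractGoA1]
      by_cases h12 : PySem.Str.strip l ≠ "" ∧ PySem.Str.len (PySem.Str.strip l) < 100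
      · rw [if_pos h12, if_neg (fun h3 => by
          simp [(titleCond_true_iff _).mpr ⟨h12.1, h12.2, h3⟩] at hcond), ih]
      · rw [if_neg h12, ih]

theorem goB_eq (ls : List String) (fb : Option String) :
    extractGoB ls fb =
      match (ls.map PySem.Str.strip).find? titleCond with
      | some s => s
      | none =>
        match fb with
        | some f => f
        | none =>
          match (ls.map PySem.Str.strip).find? (fun s => s ≠ "") with
          | some s => PySem.Str.slice s none (some 100)
          | none => "Untitled Section" := by
  induction ls generalizing fb with
  | nil => cases fb <;> rfl
  | cons l t ih =>
    by_cases h : PySem.Str.strip l = ""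
    · simp [extractGoB, titleCond, h, ih]
    · by_cases h2 : looksLikeTitle (PySem.Str.strip l) = true
      · simp [extractGoB, titleCond, h, h2]
      · have h2' : looksLikeTitle (PySem.Str.strip l) = false := by simpa using h2
        have hc : titleCond (PySem.Str.strip l) = false := by simp [titleCond, h2']
        cases fb with
        | none => simp [extractGoB, h, h2', hc, ih]
        | some f => simp [extractGoB, h, h2', hc, ih]

-- ===== VERDICT (by name: the statement is the Claim_ definition above) =====
theorem extract_section_title_spec : Claim_equal_extract_section_title := by
  intro text _
  unfold Spec_extract_section_title extract_section_title extract_section_title_alt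
  rw [goA1_eq, goB_eq, goA2_eq]
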